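-- pv_equiv track=rewrite | github.com/ShreySuri/Bulls_And_Cows | Bulls_And_Cows_2.py | list_format
-- ===== SOURCE A (Python) =====
-- def list_format(string):
--     list_2 = list(string)
--     if len(list_2) == 1:
--         list_2.reverse()
--         for i in range (0, 3):
--             list_2.append("0")
--         list_2.reverse()
--         return(list_2)
--     elif len(list_2) == 2:
--         list_2.reverse()
--         for i in range (0, 2):
--             list_2.append("0")
--         list_2.reverse()
--         return(list_2)
--     elif len(list_2) == 3:
--         list_2.reverse()
--         for i in range (0, 1):
--             list_2.append("0")
--         list_2.reverse()
--         return(list_2)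
--     elif len(list_2) == 4:
--         return(list_2)
--     else:
--         return(None)
-- ===== SOURCE B (Python) =====
-- def _pad(l):
--     # Recursively prepend "0" until the list reaches length 4.
--     if len(l) == 4:
--         return l
--     if len(l) == 0 or len(l) > 4:
--         return None
--     return _pad(["0"] + l)
--
-- def list_format(string):
--     return _pad(list(string))
-- ===== Notes on version B (the rewrite author's own statement) =====
-- stated objective: alternative
-- what changed: Replaces A's four unrolled length-specific branches (each doing reverse/append-loop/reverse) with a recursive fixed-point helper that prepends one zero-character per call until the list reaches length 4, returning None when the length is 0 or exceeds 4.
import Mathlib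
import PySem

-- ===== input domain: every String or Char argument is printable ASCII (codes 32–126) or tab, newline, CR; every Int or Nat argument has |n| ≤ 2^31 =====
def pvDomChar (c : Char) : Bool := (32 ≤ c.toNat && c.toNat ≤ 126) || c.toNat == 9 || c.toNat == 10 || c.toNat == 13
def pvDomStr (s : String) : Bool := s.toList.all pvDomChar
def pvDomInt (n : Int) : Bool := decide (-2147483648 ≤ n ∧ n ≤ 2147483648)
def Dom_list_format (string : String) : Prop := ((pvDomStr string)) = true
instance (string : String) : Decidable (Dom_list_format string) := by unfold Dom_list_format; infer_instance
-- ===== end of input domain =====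

-- B replaces A's four unrolled length-specific branches with a recursive helper that prepends one zero-character per call until length 4 (objective: alternative).


-- ===== PORT A =====
-- list(string): each character becomes a one-character string (exact for any string)
def pvChars (string : String) : List String := string.toList.map (fun c => String.ofList [c])

def list_format (string : String) : Option (List String) :=
  let list_2 := pvChars string
  if list_2.length = 1 then
    -- list_2.reverse(); for i in range(0,3): list_2.append("0"); list_2.reverse()
    let list_2 := list_2.reverse
    let list_2 := (PySem.List.pyRange 0 3 1).foldl (fun acc _ => acc ++ ["0"]) list_2
    let list_2 := list_2.reverse
    some list_2
  else if list_2.length = 2 then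
    let list_2 := list_2.reverse
    let list_2 := (PySem.List.pyRange 0 2 1).foldl (fun acc _ => acc ++ ["0"]) list_2
    let list_2 := list_2.reverse
    some list_2
  else if list_2.length = 3 then
    let list_2 := list_2.reverse
    let list_2 := (PySem.List.pyRange 0 1 1).foldl (fun acc _ => acc ++ ["0"]) list_2
    let list_2 := list_2.reverse
    some list_2
  else if list_2.length = 4 then
    some list_2
  else
    none

-- ===== PORT B =====
-- recursive helper: prepend a zero character until length 4; None when length is 0 or exceeds 4
def pvPad (l : List String) : Option (List String) :=
  if l.length = 4 then some l
  else if l.length = 0 ∨ l.length > 4 then none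
  else pvPad ("0" :: l)
termination_by 4 - l.length
decreasing_by simp_all; omega

def list_format_alt (string : String) : Option (List String) :=
  pvPad (pvChars string)

-- ===== PRECONDITION & SPEC =====
def Spec_list_format (string : String) (out : Option (List String)) : Prop := out = list_format_alt string
instance (string : String) (out : Option (List String)) : Decidable (Spec_list_format string out) := by unfold Spec_list_format; infer_instance

-- ===== CLAIM (what is proved, stated in full; the proofs are below) =====
def Claim_equal_list_format : Prop := ∀ (string : String), Dom_list_format string → Spec_list_format string (list_format string)

-- ===== LEMMAS AND PROOFS =====
theorem list_format_eq_alt (string : String) : list_format string = list_format_alt string := by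
  unfold list_format list_format_alt
  match h : pvChars string with
  | [] => simp [pvPad]
  | [a] => simp [PySem.List.pyRange, List.range_succ, pvPad]
  | [a, b] => simp [PySem.List.pyRange, List.range_succ, pvPad]
  | [a, b, c] => simp [PySem.List.pyRange, List.range_succ, pvPad]
  | [a, b, c, d] => simp [pvPad]
  | a :: b :: c :: d :: e :: rest => simp [pvPad, List.length_cons]

-- ===== VERDICT (by name: the statement is the Claim_ definition above) =====
theorem list_format_spec : Claim_equal_list_format := by
  intro string _
  unfold Spec_list_format
  exact list_format_eq_alt string
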